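-- pv_equiv track=rewrite | github.com/shiva-garg-77/Swaggo | Website/Backend/data-science/analytics_pipeline.py | _get_funnel_position
-- ===== SOURCE A (Python) =====
-- from typing import Dict, List, Optional, Union, Tuple
--
-- def _get_funnel_position(event_sequence: List[str]) -> str:
--     """Determine user's position in conversion funnel"""
--     funnel_stages = {
--         'awareness': ['view', 'browse', 'search'],
--         'interest': ['like', 'save', 'follow'],
--         'consideration': ['compare', 'research', 'detailed_view'],
--         'conversion': ['create', 'publish', 'purchase', 'subscribe'],
--         'retention': ['return_visit', 'regular_usage', 'refer']
--     }
--
--     # Find the highest stage reached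
--     highest_stage = 'awareness'
--     for stage, stage_events in funnel_stages.items():
--         if any(event in stage_events for event in event_sequence):
--             highest_stage = stage
--
--     return highest_stage
-- ===== SOURCE B (Python) =====
-- _STAGES_DESC = (
--     ('retention', frozenset({'return_visit', 'regular_usage', 'refer'})),
--     ('conversion', frozenset({'create', 'publish', 'purchase', 'subscribe'})),
--     ('consideration', frozenset({'compare', 'research', 'detailed_view'})),
--     ('interest', frozenset({'like', 'save', 'follow'})),
-- )
--
--
-- def _get_funnel_position(event_sequence):
--     """Determine user's position in conversion funnel"""
--     seen = set(event_sequence)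
--     for stage, stage_events in _STAGES_DESC:
--         if not seen.isdisjoint(stage_events):
--             return stage
--     return 'awareness'
-- ===== Notes on version B (the rewrite author's own statement) =====
-- stated objective: faster
-- what changed: Instead of A's forward scan over all five stages, each doing an 'any' membership pass over the whole event list against a small list, B builds a set of the events once and scans the stages from highest to lowest, returning early at the first stage whose frozenset intersects it ('awareness' is the fall-through default).
import Mathlib
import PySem

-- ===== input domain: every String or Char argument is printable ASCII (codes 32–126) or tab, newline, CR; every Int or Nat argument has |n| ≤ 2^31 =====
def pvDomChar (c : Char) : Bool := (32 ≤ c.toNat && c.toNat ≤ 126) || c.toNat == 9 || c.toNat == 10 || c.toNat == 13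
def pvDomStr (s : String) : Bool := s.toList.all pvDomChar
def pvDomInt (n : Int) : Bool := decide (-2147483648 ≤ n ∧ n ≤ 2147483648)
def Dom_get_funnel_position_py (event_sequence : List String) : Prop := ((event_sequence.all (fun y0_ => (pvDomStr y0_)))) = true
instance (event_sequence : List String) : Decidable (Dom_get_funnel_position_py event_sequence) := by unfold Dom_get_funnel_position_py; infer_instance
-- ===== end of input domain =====

-- B replaces A's forward overwrite-scan of all five stages with one event set and a
-- descending stage scan that returns at the first intersecting stage (alternative decomposition).

-- ===== PORT A =====
def funnelStagesA : List (String × List String) :=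
  [("awareness", ["view", "browse", "search"]),
   ("interest", ["like", "save", "follow"]),
   ("consideration", ["compare", "research", "detailed_view"]),
   ("conversion", ["create", "publish", "purchase", "subscribe"]),
   ("retention", ["return_visit", "regular_usage", "refer"])]

def get_funnel_position_py (event_sequence : List String) : String :=
  funnelStagesA.foldl
    (fun highest_stage p =>
      if event_sequence.any (fun event => p.2.contains event) then p.1 else highest_stage)
    "awareness"

-- ===== PORT B =====
def stagesDesc : List (String × PySem.Set String) :=
  [("retention", PySem.Set.ofList ["return_visit", "regular_usage", "refer"]),
   ("conversion", PySem.Set.ofList ["create", "publish", "purchase", "subscribe"]),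
   ("consideration", PySem.Set.ofList ["compare", "research", "detailed_view"]),
   ("interest", PySem.Set.ofList ["like", "save", "follow"])]

-- the for-loop with early 'return stage' is the first stage whose set meets 'seen'
def get_funnel_position_py_alt (event_sequence : List String) : String :=
  let seen : PySem.Set String := PySem.Set.ofList event_sequence
  match stagesDesc.findSome?
      (fun p => if !(PySem.Set.isdisjoint seen p.2) then some p.1 else none) with
  | some stage => stage
  | none => "awareness"

-- ===== PRECONDITION & SPEC =====
def Spec_get_funnel_position_py (event_sequence : List String) (out : String) : Prop := out = get_funnel_position_py_alt event_sequence
instance (event_sequence : List String) (out : String) : Decidable (Spec_get_funnel_position_py event_sequence out) := by unfold Spec_get_funnel_position_py; infer_instance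

-- ===== CLAIM (what is proved, stated in full; the proofs are below) =====
def Claim_equal_get_funnel_position_py : Prop := ∀ (event_sequence : List String), Dom_get_funnel_position_py event_sequence → Spec_get_funnel_position_py event_sequence (get_funnel_position_py event_sequence)

-- ===== LEMMAS AND PROOFS =====

-- "some event of the sequence lies in stage list l" — A's condition for a stage
-- equals B's non-disjointness of set(event_sequence) with that stage's frozenset
lemma cond_eq (l es : List String) :
    (!(PySem.Set.isdisjoint (PySem.Set.ofList es) (PySem.Set.ofList l))) =
      es.any (fun e => l.contains e) := by
  by_cases hc : ∃ x ∈ es, x ∈ l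
  · obtain ⟨x, hxe, hxl⟩ := hc
    have hr : es.any (fun e => l.contains e) = true :=
      List.any_eq_true.mpr ⟨x, hxe, List.contains_iff_mem.mpr hxl⟩
    have hd : PySem.Set.isdisjoint (PySem.Set.ofList es) (PySem.Set.ofList l) = false := by
      rw [← Bool.not_eq_true, PySem.Set.isdisjoint_iff]
      intro h
      exact h x ((PySem.Set.mem_ofList _ _).mpr hxe) ((PySem.Set.mem_ofList _ _).mpr hxl)
    rw [hr, hd]
    rfl
  · push Not at hc
    have hr : es.any (fun e => l.contains e) = false := by
      rw [List.any_eq_false]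
      intro e he hcon
      exact hc e he (List.contains_iff_mem.mp hcon)
    have hd : PySem.Set.isdisjoint (PySem.Set.ofList es) (PySem.Set.ofList l) = true := by
      rw [PySem.Set.isdisjoint_iff]
      intro x hx hxl
      exact hc x ((PySem.Set.mem_ofList _ _).mp hx) ((PySem.Set.mem_ofList _ _).mp hxl)
    rw [hr, hd]
    rfl

-- ===== VERDICT (by name: the statement is the Claim_ definition above) =====
theorem get_funnel_position_py_spec : Claim_equal_get_funnel_position_py := by
  intro es _
  unfold Spec_get_funnel_position_py get_funnel_position_py get_funnel_position_py_alt
    funnelStagesA stagesDesc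
  simp only [List.foldl, List.findSome?]
  rw [cond_eq, cond_eq, cond_eq, cond_eq]
  split_ifs <;> rfl
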